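-- pv_equiv track=rewrite | github.com/911-Berescu-Adrian/Quoridor | src/ui/gui.py | cell_to_offset
-- ===== SOURCE A (Python) =====
-- def cell_to_offset(window,row,col):
--     deltay = 755 - 150
--     deltax=[]
--     for i in range(0,10):
--         x_start=423-int(i*(423-221)/9)
--         x_end=945+int(i*(1146-945)/9)
--         delta_x=x_end-x_start
--         deltax.append([x_start,x_end,delta_x])
--     top_left=(deltax[row][0]+int(col*deltax[row][2]/9)+2,int(150+row*deltay/9))
--     top_right=(deltax[row][0]+int((col+1)*deltax[row][2]/9)+2,int(150+row*deltay/9))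
--     bottom_right=(deltax[row+1][0]+int((col+1)*deltax[row+1][2]/9)+2,int(150+(row+1)*deltay/9))
--     bottom_left=(deltax[row+1][0]+col*int(deltax[row+1][2]/9)+2,int(150+(row+1)*deltay/9))
--     return top_left,top_right,bottom_right,bottom_left
-- ===== SOURCE B (Python) =====
-- def cell_to_offset(window, row, col):
--     # Directly compute the geometry of rows `row` and `row+1` instead of
--     # building the full 10-row table and indexing into it.
--     xs0 = 423 - int(row * (423 - 221) / 9)
--     xe0 = 945 + int(row * (1146 - 945) / 9)
--     dx0 = xe0 - xs0
--     xs1 = 423 - int((row + 1) * (423 - 221) / 9)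
--     xe1 = 945 + int((row + 1) * (1146 - 945) / 9)
--     dx1 = xe1 - xs1
--     y0 = int(150 + row * (755 - 150) / 9)
--     y1 = int(150 + (row + 1) * (755 - 150) / 9)
--     top_left = (xs0 + int(col * dx0 / 9) + 2, y0)
--     top_right = (xs0 + int((col + 1) * dx0 / 9) + 2, y0)
--     bottom_right = (xs1 + int((col + 1) * dx1 / 9) + 2, y1)
--     bottom_left = (xs1 + col * int(dx1 / 9) + 2, y1)
--     return top_left, top_right, bottom_right, bottom_left
-- ===== Notes on version B (the rewrite author's own statement) =====
-- stated objective: simpler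
-- what changed: B drops A's loop that builds the full 10-row geometry table (and the list indexing into it) and instead computes the two needed rows' x-start/x-end/width directly from the same closed-form expressions, keeping A's exact int() placements.
-- intended difference: On negative rows -10..-1 (off the 9-row board, still valid Python indices) A returns the geometry that negative-index wraparound picks out of its 10-row table, while B returns the closed-form extrapolation of the same row formulas, the intended value for an off-board row. — e.g. on cell_to_offset(0, -1, 0): A returns ((223, 82), (325, 82), (483, 150), (425, 150)), B returns ((447, 82), (500, 82), (483, 150), (425, 150))
import Mathlib
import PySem

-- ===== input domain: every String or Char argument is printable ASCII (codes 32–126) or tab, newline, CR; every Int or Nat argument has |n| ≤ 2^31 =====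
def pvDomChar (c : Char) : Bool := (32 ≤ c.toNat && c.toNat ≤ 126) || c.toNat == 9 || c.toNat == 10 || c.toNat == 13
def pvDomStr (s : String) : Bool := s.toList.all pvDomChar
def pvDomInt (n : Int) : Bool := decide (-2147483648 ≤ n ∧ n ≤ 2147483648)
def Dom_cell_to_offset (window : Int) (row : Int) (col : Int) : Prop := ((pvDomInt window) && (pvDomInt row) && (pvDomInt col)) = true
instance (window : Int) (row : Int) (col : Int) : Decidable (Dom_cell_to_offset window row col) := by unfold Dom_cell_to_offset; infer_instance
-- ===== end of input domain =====

-- B drops A's 10-row table-building loop and computes the two needed row geometries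
-- directly from the same closed-form expressions (objective: simpler).
-- Python's `int(x / 9)` (float division, then truncation toward zero) is ported as
-- `Int.tdiv _ 9`; this is exact on the stated domain (|ints| ≤ 2^31: the numerators stay
-- below 2^44, where the double rounding error cannot cross the ≥ 1/9 gap to an integer),
-- and `int(150 + row*deltay/9)` is ported as `Int.tdiv (150*9 + row*deltay) 9` (the same
-- truncation applied to the exact sum).

-- ===== PORT A =====
def cell_to_offset (window : Int) (row : Int) (col : Int) : (Int × Int) × (Int × Int) × (Int × Int) × (Int × Int) :=
  let deltay : Int := 755 - 150
  -- for i in range(0,10): deltax.append([x_start, x_end, delta_x])  (a 3-element row, kept as a triple)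
  let deltax : List (Int × Int × Int) :=
    (PySem.List.pyRange 0 10 1).foldl (fun acc i =>
      let x_start : Int := 423 - Int.tdiv (i * (423 - 221)) 9
      let x_end : Int := 945 + Int.tdiv (i * (1146 - 945)) 9
      let delta_x : Int := x_end - x_start
      acc ++ [(x_start, x_end, delta_x)]) []
  -- deltax[row] / deltax[row+1]: Python indexing (negative wraparound, IndexError = none,
  -- excluded by Pre_); .getD is only reached outside Pre_
  let dr : Int × Int × Int := (PySem.List.pyGet? deltax row).getD (0, 0, 0)
  let dr1 : Int × Int × Int := (PySem.List.pyGet? deltax (row + 1)).getD (0, 0, 0)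
  let top_left : Int × Int := (dr.1 + Int.tdiv (col * dr.2.2) 9 + 2, Int.tdiv (150 * 9 + row * deltay) 9)
  let top_right : Int × Int := (dr.1 + Int.tdiv ((col + 1) * dr.2.2) 9 + 2, Int.tdiv (150 * 9 + row * deltay) 9)
  let bottom_right : Int × Int := (dr1.1 + Int.tdiv ((col + 1) * dr1.2.2) 9 + 2, Int.tdiv (150 * 9 + (row + 1) * deltay) 9)
  let bottom_left : Int × Int := (dr1.1 + col * Int.tdiv dr1.2.2 9 + 2, Int.tdiv (150 * 9 + (row + 1) * deltay) 9)
  (top_left, top_right, bottom_right, bottom_left)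

-- ===== PORT B =====
def cell_to_offset_alt (window : Int) (row : Int) (col : Int) : (Int × Int) × (Int × Int) × (Int × Int) × (Int × Int) :=
  let xs0 : Int := 423 - Int.tdiv (row * (423 - 221)) 9
  let xe0 : Int := 945 + Int.tdiv (row * (1146 - 945)) 9
  let dx0 : Int := xe0 - xs0
  let xs1 : Int := 423 - Int.tdiv ((row + 1) * (423 - 221)) 9
  let xe1 : Int := 945 + Int.tdiv ((row + 1) * (1146 - 945)) 9
  let dx1 : Int := xe1 - xs1
  let y0 : Int := Int.tdiv (150 * 9 + row * (755 - 150)) 9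
  let y1 : Int := Int.tdiv (150 * 9 + (row + 1) * (755 - 150)) 9
  ((xs0 + Int.tdiv (col * dx0) 9 + 2, y0),
   (xs0 + Int.tdiv ((col + 1) * dx0) 9 + 2, y0),
   (xs1 + Int.tdiv ((col + 1) * dx1) 9 + 2, y1),
   (xs1 + col * Int.tdiv dx1 9 + 2, y1))

-- ===== PRECONDITION & SPEC =====
-- Pre_ is exactly where the Python A returns: row and row+1 must be valid Python indices into
-- the 10-element table (otherwise IndexError), i.e. -10 <= row <= 8.
def Pre_cell_to_offset (window : Int) (row : Int) (col : Int) : Prop := -10 ≤ row ∧ row ≤ 8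
instance (window : Int) (row : Int) (col : Int) : Decidable (Pre_cell_to_offset window row col) := by unfold Pre_cell_to_offset; infer_instance
def pvWitness_cell_to_offset : Int × Int × Int := (0, 3, 5)

-- On negative rows -10..-1 (off the 9-row board) A returns the geometry of table rows 0..9 picked
-- up by Python's negative-index wraparound, while B returns the closed-form extrapolation of the
-- same row formulas, the intended value for a row below the board.
def D_cell_to_offset (window : Int) (row : Int) (col : Int) : Prop := -10 ≤ row ∧ row ≤ -1
instance (window : Int) (row : Int) (col : Int) : Decidable (D_cell_to_offset window row col) := by unfold D_cell_to_offset; infer_instance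

def Spec_cell_to_offset (window : Int) (row : Int) (col : Int) (out : (Int × Int) × (Int × Int) × (Int × Int) × (Int × Int)) : Prop := ¬ D_cell_to_offset window row col → out = cell_to_offset_alt window row col
instance (window : Int) (row : Int) (col : Int) (out : (Int × Int) × (Int × Int) × (Int × Int) × (Int × Int)) : Decidable (Spec_cell_to_offset window row col out) := by unfold Spec_cell_to_offset; infer_instance

def pvDiffWitness_cell_to_offset : Int × Int × Int := (0, -1, 0)
def pvDiffWitnessOut_cell_to_offset : ((Int × Int) × (Int × Int) × (Int × Int) × (Int × Int)) × ((Int × Int) × (Int × Int) × (Int × Int) × (Int × Int)) :=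
  (((223, 82), (325, 82), (483, 150), (425, 150)), ((447, 82), (500, 82), (483, 150), (425, 150)))

-- ===== CLAIM (what is proved, stated in full; the proofs are below) =====
def Claim_unchanged_cell_to_offset : Prop := ∀ (window : Int) (row : Int) (col : Int), Dom_cell_to_offset window row col → Pre_cell_to_offset window row col → Spec_cell_to_offset window row col (cell_to_offset window row col)
def Claim_changed_cell_to_offset : Prop := Dom_cell_to_offset (pvDiffWitness_cell_to_offset.1) (pvDiffWitness_cell_to_offset.2.1) (pvDiffWitness_cell_to_offset.2.2) ∧ Pre_cell_to_offset (pvDiffWitness_cell_to_offset.1) (pvDiffWitness_cell_to_offset.2.1) (pvDiffWitness_cell_to_offset.2.2) ∧ D_cell_to_offset (pvDiffWitness_cell_to_offset.1) (pvDiffWitness_cell_to_offset.2.1) (pvDiffWitness_cell_to_offset.2.2) ∧ cell_to_offset (pvDiffWitness_cell_to_offset.1) (pvDiffWitness_cell_to_offset.2.1) (pvDiffWitness_cell_to_offset.2.2) = pvDiffWitnessOut_cell_to_offset.1 ∧ cell_to_offset_alt (pvDiffWitness_cell_to_offset.1) (pvDiffWitness_cell_to_offset.2.1) (pvDiffWitness_cell_to_offset.2.2)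 = pvDiffWitnessOut_cell_to_offset.2 ∧ pvDiffWitnessOut_cell_to_offset.1 ≠ pvDiffWitnessOut_cell_to_offset.2

-- ===== LEMMAS AND PROOFS =====

-- ===== VERDICT (by name: the statement is the Claim_ definition above) =====
theorem cell_to_offset_spec : Claim_unchanged_cell_to_offset := by
  intro w r c _ hpre
  unfold Spec_cell_to_offset
  intro hd
  unfold D_cell_to_offset at hd
  have h9 : r = 0 ∨ r = 1 ∨ r = 2 ∨ r = 3 ∨ r = 4 ∨ r = 5 ∨ r = 6 ∨ r = 7 ∨ r = 8 := by
    obtain ⟨h1, h2⟩ := hpre; omega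
  rcases h9 with h | h | h | h | h | h | h | h | h <;> subst h <;> rfl

theorem cell_to_offset_changed : Claim_changed_cell_to_offset := by
  unfold Claim_changed_cell_to_offset; decide
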